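-- pv_equiv track=rewrite | github.com/santiagocorrea-ux/IA_lead_tech | src/automation/browser.py | find_branch_row
-- ===== SOURCE A (Python) =====
-- from typing import Any
--
-- def normalize(text: str | None) -> str:
--     return " ".join((text or "").split())
--
-- def find_branch_row(
--     rows: list[dict[str, Any]],
--     branch_name: str,
--     allow_partial: bool = False,
-- ) -> dict[str, Any] | None:
--     target = normalize(branch_name).lower()
--
--     exact = [r for r in rows if normalize(r.get("Branch")).lower() == target]
--     if exact:
--         return exact[0]
--
--     if allow_partial:
--         partial = [r for r in rows if target in normalize(r.get("Branch")).lower()]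
--         if len(partial) == 1:
--             return partial[0]
--         if len(partial) > 1:
--             matches = ", ".join(r.get("Branch", "") for r in partial[:10])
--             raise ValueError(f"More than one branch matched '{branch_name}': {matches}")
--
--     return None
-- ===== SOURCE B (Python) =====
-- def find_branch_row(rows, branch_name, allow_partial=False):
--     target = " ".join(branch_name.split()).lower()
--     partial = []
--     for r in rows:
--         b = " ".join((r.get("Branch") or "").split()).lower()
--         if b == target:
--             return r  # first exact match wins; later rows cannot change A's answer
--         if allow_partial and target in b:
--             partial.append(r)
--     if allow_partial:
--         if len(partial) == 1:
--             return partial[0]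
--         if len(partial) > 1:
--             matches = ", ".join(r.get("Branch", "") for r in partial[:10])
--             raise ValueError(f"More than one branch matched '{branch_name}': {matches}")
--     return None
-- ===== Notes on version B (the rewrite author's own statement) =====
-- stated objective: alternative
-- what changed: replaces A's two separate full-list comprehension passes (exact filter, then partial filter) with a single loop that returns on the first exact match and accumulates partial matches as it goes
import Mathlib
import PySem

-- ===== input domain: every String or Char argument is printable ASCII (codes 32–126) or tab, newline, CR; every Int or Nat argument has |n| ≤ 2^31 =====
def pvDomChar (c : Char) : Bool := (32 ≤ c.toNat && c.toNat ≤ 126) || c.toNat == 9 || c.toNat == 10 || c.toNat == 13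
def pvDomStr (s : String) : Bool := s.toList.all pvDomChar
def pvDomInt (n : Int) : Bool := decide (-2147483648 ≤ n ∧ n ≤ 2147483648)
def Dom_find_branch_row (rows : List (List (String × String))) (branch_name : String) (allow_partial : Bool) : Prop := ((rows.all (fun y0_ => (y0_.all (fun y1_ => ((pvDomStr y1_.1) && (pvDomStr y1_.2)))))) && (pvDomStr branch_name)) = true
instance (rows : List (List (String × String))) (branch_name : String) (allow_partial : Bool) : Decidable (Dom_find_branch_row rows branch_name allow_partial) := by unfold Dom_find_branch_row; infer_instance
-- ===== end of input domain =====

-- ===== PORT A =====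
-- B fuses A's two separate filter passes into one early-exit loop; return-value equivalence only.
-- normalize(text): " ".join((text or "").split())
def pvNorm (s : String) : String := PySem.Str.join " " (PySem.Str.split₀ s)

-- normalize(r.get("Branch")).lower() — the row-key expression both Pythons compute
def pvBranchKey (r : List (String × String)) : String :=
  PySem.Str.lower (pvNorm (((PySem.Dict.mk r).get? "Branch").getD ""))

def find_branch_row (rows : List (List (String × String))) (branch_name : String) (allow_partial : Bool) : Option (List (String × String)) :=
  let target := PySem.Str.lower (pvNorm branch_name)
  let exact := rows.filter (fun r => pvBranchKey r == target)
  match exact with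
  | e :: _ => some e
  | [] =>
    if allow_partial then
      let part := rows.filter (fun r => PySem.Str.isIn target (pvBranchKey r))
      if part.length == 1 then part.head?
      else none   -- part.length > 1: Python raises ValueError, excluded by Pre_
    else none

-- ===== PORT B =====
-- Source B's code after the loop: return the lone partial match, else None ('> 1' raises, excluded by Pre_)
def pvFinish (ap : Bool) (part : List (List (String × String))) : Option (List (String × String)) :=
  if ap then
    (if part.length == 1 then part.head?
     else none)   -- part.length > 1: Python raises ValueError, excluded by Pre_
  else none

-- Source B's single loop: return on first exact match, accumulate partial matches
def pvAltLoop (ap : Bool) (target : String) : List (List (String × String)) → List (List (String × String)) → Option (List (String × String))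
  | [], part => pvFinish ap part
  | r :: rest, part =>
    let b := pvBranchKey r
    if b == target then some r
    else if ap && PySem.Str.isIn target b then pvAltLoop ap target rest (part ++ [r])
    else pvAltLoop ap target rest part

def find_branch_row_alt (rows : List (List (String × String))) (branch_name : String) (allow_partial : Bool) : Option (List (String × String)) :=
  pvAltLoop allow_partial (PySem.Str.lower (pvNorm branch_name)) rows []

-- ===== PRECONDITION & SPEC =====
-- Pre_ excludes exactly the inputs where the Python raises ValueError (both A and B raise there):
-- allow_partial set, no exact match, and more than one partial match.
def Pre_find_branch_row (rows : List (List (String × String))) (branch_name : String) (allow_partial : Bool) : Prop :=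
  ¬ (allow_partial = true
     ∧ (∀ r ∈ rows, ¬ pvBranchKey r = PySem.Str.lower (pvNorm branch_name))
     ∧ 1 < rows.countP (fun r => PySem.Str.isIn (PySem.Str.lower (pvNorm branch_name)) (pvBranchKey r)))
instance (rows : List (List (String × String))) (branch_name : String) (allow_partial : Bool) : Decidable (Pre_find_branch_row rows branch_name allow_partial) := by unfold Pre_find_branch_row; infer_instance
def pvWitness_find_branch_row : (List (List (String × String))) × String × Bool :=
  ([[("Branch", "dev  a")], [("Branch", "main")]], "Dev a", true)

def Spec_find_branch_row (rows : List (List (String × String))) (branch_name : String) (allow_partial : Bool) (out : Option (List (String × String))) : Prop := out = find_branch_row_alt rows branch_name allow_partial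
instance (rows : List (List (String × String))) (branch_name : String) (allow_partial : Bool) (out : Option (List (String × String))) : Decidable (Spec_find_branch_row rows branch_name allow_partial out) := by unfold Spec_find_branch_row; infer_instance

-- ===== CLAIM (what is proved, stated in full; the proofs are below) =====
def Claim_equal_find_branch_row : Prop := ∀ (rows : List (List (String × String))) (branch_name : String) (allow_partial : Bool), Dom_find_branch_row rows branch_name allow_partial → Pre_find_branch_row rows branch_name allow_partial → Spec_find_branch_row rows branch_name allow_partial (find_branch_row rows branch_name allow_partial)

-- ===== LEMMAS AND PROOFS =====
theorem pvFinish_false (part : List (List (String × String))) : pvFinish false part = none := rfl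

-- the loop invariant: pvAltLoop returns the first exact match of the suffix if any, else
-- finishes with the accumulated partial matches extended by those of the suffix
theorem pvAltLoop_eq (ap : Bool) (target : String) (l part : List (List (String × String))) :
    pvAltLoop ap target l part =
      match (l.filter (fun r => pvBranchKey r == target)).head? with
      | some e => some e
      | none =>
        pvFinish ap (part ++ l.filter (fun r => !(pvBranchKey r == target) && PySem.Str.isIn target (pvBranchKey r))) := by
  induction l generalizing part with
  | nil => simp [pvAltLoop]
  | cons r rest ih =>
    by_cases hx : (pvBranchKey r == target) = true
    · simp [pvAltLoop, hx]
    · have hx' : (pvBranchKey r == target) = false := by simp_all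
      by_cases hap : ap = true
      · subst hap
        by_cases hpt : PySem.Str.isIn target (pvBranchKey r) = true
        · have hpt' := hpt
          simp only [PySem.Str.isIn_eq] at hpt'
          simp [pvAltLoop, hx', hpt', ih, List.append_assoc]
        · have hpt' : PySem.Str.isIn target (pvBranchKey r) = false := by simp_all
          have hpt'' := hpt'
          simp only [PySem.Str.isIn_eq] at hpt''
          simp [pvAltLoop, hx', hpt'', ih]
      · have hap' : ap = false := by simp_all
        subst hap'
        simp [pvAltLoop, hx', ih, pvFinish_false, List.filter_cons]

-- ===== VERDICT (by name: the statement is the Claim_ definition above) =====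
theorem find_branch_row_spec : Claim_equal_find_branch_row := by
  intro rows branch_name allow_partial _ _
  unfold Spec_find_branch_row find_branch_row find_branch_row_alt
  rw [pvAltLoop_eq]
  cases hx : rows.filter (fun r => pvBranchKey r == (PySem.Str.lower (pvNorm branch_name))) with
  | cons e t => simp [hx]
  | nil =>
    have hall := List.filter_eq_nil_iff.mp hx
    have hcg : rows.filter
        (fun r => !(pvBranchKey r == PySem.Str.lower (pvNorm branch_name)) && PySem.Str.isIn (PySem.Str.lower (pvNorm branch_name)) (pvBranchKey r))
        = rows.filter (fun r => PySem.Str.isIn (PySem.Str.lower (pvNorm branch_name)) (pvBranchKey r)) := by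
      apply List.filter_congr
      intro r hr
      have := hall r hr
      simp_all
    simp only [hx, List.head?_nil, List.nil_append, hcg, pvFinish]
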